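-- pv_equiv track=rewrite | github.com/kchangch/CMPT479 | AS2/cribdrag.py | cribpend
-- ===== SOURCE A (Python) =====
-- def cribpend(a, crib, loc):
--     #crib is too small; append it with 0's depending on location
--     s = []
--     for i in range(0, loc):
--         s.append(0)
--     for i in range(0, len(crib)):
--         s.append(crib[i])
--     for i in range(len(crib) + loc, len(a)):
--         s.append(0)
--     s = s[:len(a)]
--     return s
-- ===== SOURCE B (Python) =====
-- def cribpend(a, crib, loc):
--     start = max(loc, 0)
--     return [crib[j - start] if start <= j < start + len(crib) else 0
--             for j in range(len(a))]
-- ===== Notes on version B (the rewrite author's own statement) =====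
-- stated objective: alternative
-- what changed: B computes each output element directly by position in one gather comprehension over range(len(a)) (crib[j-start] inside the window, 0 outside), instead of A's three append passes building a sequence that is then truncated.
import Mathlib
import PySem

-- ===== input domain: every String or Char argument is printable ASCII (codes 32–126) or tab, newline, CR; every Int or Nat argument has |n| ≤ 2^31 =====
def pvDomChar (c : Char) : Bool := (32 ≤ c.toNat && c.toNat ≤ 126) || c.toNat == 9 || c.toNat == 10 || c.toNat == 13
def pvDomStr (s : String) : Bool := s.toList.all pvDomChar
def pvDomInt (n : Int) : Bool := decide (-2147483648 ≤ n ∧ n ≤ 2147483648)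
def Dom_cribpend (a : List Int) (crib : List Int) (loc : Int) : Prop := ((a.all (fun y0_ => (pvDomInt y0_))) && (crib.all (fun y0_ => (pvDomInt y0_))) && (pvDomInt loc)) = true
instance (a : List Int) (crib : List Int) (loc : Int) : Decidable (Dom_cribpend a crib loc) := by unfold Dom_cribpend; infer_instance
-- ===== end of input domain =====

-- B computes each output element directly by its position (gather over range(len(a)))
-- instead of A's three append passes plus a truncating slice (alternative decomposition).

-- ===== PORT A =====
def cribpend (a : List Int) (crib : List Int) (loc : Int) : List Int :=
  let s : List Int := []
  let s := (PySem.List.pyRange 0 loc 1).foldl (fun s _ => s ++ [(0 : Int)]) s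
  -- crib[i] with i ∈ range(len(crib)) is always in range, so pyGetD is exact here
  let s := (PySem.List.pyRange 0 (crib.length : Int) 1).foldl
    (fun s i => s ++ [PySem.List.pyGetD crib i 0]) s
  let s := (PySem.List.pyRange ((crib.length : Int) + loc) (a.length : Int) 1).foldl
    (fun s _ => s ++ [(0 : Int)]) s
  PySem.List.slice s none (some (a.length : Int))

-- ===== PORT B =====
def cribpend_alt (a : List Int) (crib : List Int) (loc : Int) : List Int :=
  let start : Int := max loc 0
  -- crib[j - start] is only read when start ≤ j < start + len(crib), so the index
  -- is always in range and pyGetD is exact here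
  (PySem.List.pyRange 0 (a.length : Int) 1).map (fun j =>
    if start ≤ j ∧ j < start + (crib.length : Int) then
      PySem.List.pyGetD crib (j - start) 0
    else 0)

-- ===== PRECONDITION & SPEC =====
def Spec_cribpend (a : List Int) (crib : List Int) (loc : Int) (out : List Int) : Prop := out = cribpend_alt a crib loc
instance (a : List Int) (crib : List Int) (loc : Int) (out : List Int) : Decidable (Spec_cribpend a crib loc out) := by unfold Spec_cribpend; infer_instance

-- ===== CLAIM (what is proved, stated in full; the proofs are below) =====
def Claim_equal_cribpend : Prop := ∀ (a : List Int) (crib : List Int) (loc : Int), Dom_cribpend a crib loc → Spec_cribpend a crib loc (cribpend a crib loc)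

-- ===== LEMMAS AND PROOFS =====

-- A's result is the three concatenated blocks truncated to len(a).
theorem cribpend_eq_take (a : List Int) (crib : List Int) (loc : Int) :
    cribpend a crib loc
    = List.take a.length (List.replicate loc.toNat (0:Int) ++ crib
        ++ List.replicate ((a.length : Int) - ((crib.length : Int) + loc)).toNat 0) := by
  unfold cribpend
  simp only [PySem.List.foldl_append_singleton_eq_map]
  rw [PySem.List.slice_to_natCast]
  simp [List.map_const', PySem.List.length_pyRange_one, PySem.List.map_pyGetD_pyRange_zero']

-- B's result is the same gather written over Nat indices.
theorem cribpend_alt_eq_gather (a : List Int) (crib : List Int) (loc : Int) :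
    cribpend_alt a crib loc
    = (List.range a.length).map (fun j =>
        if loc.toNat ≤ j ∧ j < loc.toNat + crib.length then crib.getD (j - loc.toNat) 0 else 0) := by
  unfold cribpend_alt
  rw [PySem.List.pyRange_one, List.map_map]
  have hnum : ((a.length : Int) - 0).toNat = a.length := by omega
  rw [hnum]
  apply List.map_congr_left
  intro j _
  have hmax : max loc 0 = (loc.toNat : Int) := by rw [← Int.toNat_eq_max]
  simp only [Function.comp, Int.zero_add, hmax]
  by_cases h : loc.toNat ≤ j ∧ j < loc.toNat + crib.length
  · have hcond : ((loc.toNat : Int) ≤ (j : Int) ∧ (j : Int) < (loc.toNat : Int) + (crib.length : Int)) := by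
      exact_mod_cast h
    rw [if_pos hcond, if_pos h]
    have : ((j : Int) - (loc.toNat : Int)) = ((j - loc.toNat : Nat) : Int) := by
      omega
    rw [this, PySem.List.pyGetD_natCast]
  · rw [if_neg (by exact_mod_cast h), if_neg h]

-- Per-index gather equals the truncated block concatenation when the blocks cover n.
theorem gather_eq_take (crib : List Int) (n s m : Nat) (hm : n ≤ s + crib.length + m) :
    (List.range n).map (fun j =>
        if s ≤ j ∧ j < s + crib.length then crib.getD (j - s) 0 else (0:Int))
    = List.take n (List.replicate s (0:Int) ++ (crib ++ List.replicate m 0)) := by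
  apply List.ext_getElem
  · simp; omega
  · intro j h1 h2
    have hj : j < n := by simpa using h1
    simp only [List.getElem_map, List.getElem_range, List.getElem_take]
    by_cases hs : j < s
    · rw [if_neg (by omega)]
      simp [hs]
    · by_cases hc : j < s + crib.length
      · rw [if_pos ⟨by omega, hc⟩]
        have hb : j < (List.replicate s (0:Int) ++ (crib ++ List.replicate m 0)).length := by
          simp only [List.length_append, List.length_replicate]; omega
        have hq : (List.replicate s (0:Int) ++ (crib ++ List.replicate m 0))[j]? = some (crib.getD (j - s) 0) := by
          rw [List.getElem?_append_right (by simp only [List.length_replicate]; omega),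
              List.getElem?_append_left (by simp only [List.length_replicate]; omega)]
          simp only [List.length_replicate]
          rw [List.getElem?_eq_getElem (by omega : j - s < crib.length),
              List.getD_eq_getElem crib 0 (by omega : j - s < crib.length)]
        rw [List.getElem?_eq_getElem hb] at hq
        exact (Option.some_injective _ hq).symm
      · rw [if_neg (by omega)]
        have hb : j < (List.replicate s (0:Int) ++ (crib ++ List.replicate m 0)).length := by
          simp only [List.length_append, List.length_replicate]; omega
        have hq : (List.replicate s (0:Int) ++ (crib ++ List.replicate m 0))[j]? = some 0 := by
          rw [List.getElem?_append_right (by simp only [List.length_replicate]; omega),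
              List.getElem?_append_right (by simp only [List.length_replicate]; omega)]
          simp only [List.length_replicate, List.getElem?_replicate]
          rw [if_pos (by omega)]
        rw [List.getElem?_eq_getElem hb] at hq
        exact (Option.some_injective _ hq).symm

-- ===== VERDICT (by name: the statement is the Claim_ definition above) =====
theorem cribpend_spec : Claim_equal_cribpend := by
  intro a crib loc _
  show cribpend a crib loc = cribpend_alt a crib loc
  rw [cribpend_eq_take, cribpend_alt_eq_gather, List.append_assoc,
    gather_eq_take crib a.length loc.toNat (((a.length : Int) - ((crib.length : Int) + loc)).toNat) (by omega)]
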